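-- pv_equiv track=rewrite | github.com/Linnypurr/PythonPracticeProblems | zero_matrix.py | process_columns
-- ===== SOURCE A (Python) =====
-- def process_columns(matrix, row_length, column_length):
--     has_zero_column = False
--     for column in range(column_length):
--         column_array = []
--         for row in range(row_length):
--             column_array.append(matrix[row][column])
--         if column_is_all_zero(column_array):
--             has_zero_column = True
--     return has_zero_column
--
-- def column_is_all_zero(column):
--     return sum(column) == 0
-- ===== SOURCE B (Python) =====
-- def process_columns(matrix, row_length, column_length):
--     sums = [0] * column_length
--     if not sums:
--         return False
--     for row in range(row_length):
--         sums = [s + matrix[row][c] for c, s in enumerate(sums)]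
--     return any(s == 0 for s in sums)
-- ===== Notes on version B (the rewrite author's own statement) =====
-- stated objective: alternative
-- what changed: Instead of rebuilding each column list in a column-major double loop and summing it, B makes a row-major pass that maintains a vector of partial column sums and finally asks whether any sum is zero.
import Mathlib
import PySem

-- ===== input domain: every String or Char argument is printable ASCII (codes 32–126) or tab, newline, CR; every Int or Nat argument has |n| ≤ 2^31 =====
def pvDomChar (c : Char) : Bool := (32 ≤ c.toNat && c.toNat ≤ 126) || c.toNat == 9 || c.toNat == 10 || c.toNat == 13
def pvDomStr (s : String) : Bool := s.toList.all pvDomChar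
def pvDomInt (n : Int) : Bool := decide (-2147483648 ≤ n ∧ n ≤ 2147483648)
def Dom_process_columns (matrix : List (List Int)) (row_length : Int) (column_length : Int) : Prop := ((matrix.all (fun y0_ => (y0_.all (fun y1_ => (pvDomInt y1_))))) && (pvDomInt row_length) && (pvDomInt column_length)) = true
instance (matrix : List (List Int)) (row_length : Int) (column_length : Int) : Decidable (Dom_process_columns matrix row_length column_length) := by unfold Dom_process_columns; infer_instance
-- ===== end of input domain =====

-- B replaces A's column-major rebuild-and-sum of each column by a row-major pass
-- maintaining a vector of partial column sums; same cost, different traversal.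


-- ===== PORT A =====
def column_is_all_zero (column : List Int) : Bool := column.sum == 0

def process_columns (matrix : List (List Int)) (row_length : Int) (column_length : Int) : Bool :=
  (PySem.List.pyRange 0 column_length 1).foldl (fun has_zero_column column =>
    let column_array := (PySem.List.pyRange 0 row_length 1).foldl
      (fun arr row => arr ++ [PySem.List.pyGetD (PySem.List.pyGetD matrix row []) column 0]) []
    if column_is_all_zero column_array then true else has_zero_column) false

-- ===== PORT B =====
def process_columns_alt (matrix : List (List Int)) (row_length : Int) (column_length : Int) : Bool :=
  let sums0 : List Int := PySem.List.pyRepeat [0] column_length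
  if sums0 = [] then false else
  let sums := (PySem.List.pyRange 0 row_length 1).foldl
    (fun sums row => (PySem.List.enumerate sums).map
      (fun cs => cs.2 + PySem.List.pyGetD (PySem.List.pyGetD matrix row []) cs.1 0)) sums0
  sums.any (fun s => s == 0)

-- ===== PRECONDITION & SPEC =====
-- Pre_ excludes exactly the inputs where Python A raises IndexError: some accessed
-- matrix[row][column] with 0 ≤ row < row_length, 0 ≤ column < column_length is missing.
def Pre_process_columns (matrix : List (List Int)) (row_length : Int) (column_length : Int) : Prop :=
  column_length ≤ 0 ∨ row_length ≤ 0 ∨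
  (row_length ≤ (matrix.length : Int) ∧
    ∀ r ∈ matrix.take row_length.toNat, column_length ≤ (r.length : Int))
instance (matrix : List (List Int)) (row_length : Int) (column_length : Int) : Decidable (Pre_process_columns matrix row_length column_length) := by unfold Pre_process_columns; infer_instance

def pvWitness_process_columns : List (List Int) × Int × Int := ([[0, 1], [2, -1]], 2, 2)

def Spec_process_columns (matrix : List (List Int)) (row_length : Int) (column_length : Int) (out : Bool) : Prop := out = process_columns_alt matrix row_length column_length
instance (matrix : List (List Int)) (row_length : Int) (column_length : Int) (out : Bool) : Decidable (Spec_process_columns matrix row_length column_length out) := by unfold Spec_process_columns; infer_instance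

-- ===== CLAIM (what is proved, stated in full; the proofs are below) =====
def Claim_equal_process_columns : Prop := ∀ (matrix : List (List Int)) (row_length : Int) (column_length : Int), Dom_process_columns matrix row_length column_length → Pre_process_columns matrix row_length column_length → Spec_process_columns matrix row_length column_length (process_columns matrix row_length column_length)

-- ===== LEMMAS AND PROOFS =====

/-- The matrix entry both ports read: `matrix[row][column]` with defaults. -/
def pvG (matrix : List (List Int)) (r c : Int) : Int :=
  PySem.List.pyGetD (PySem.List.pyGetD matrix r []) c 0

lemma pvFoldIfAny (p : Int → Bool) (l : List Int) (acc : Bool) :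
    l.foldl (fun a x => if p x then true else a) acc = (acc || l.any p) := by
  induction l generalizing acc with
  | nil => simp
  | cons x t ih =>
    simp only [List.foldl_cons, List.any_cons, ih]
    cases p x <;> simp

lemma pvA_char (m : List (List Int)) (rl cl : Int) :
    process_columns m rl cl =
      (PySem.List.pyRange 0 cl 1).any (fun c =>
        ((PySem.List.pyRange 0 rl 1).map (fun r => pvG m r c)).sum == 0) := by
  unfold process_columns
  simp only [PySem.List.foldl_append_singleton_eq_map, List.nil_append, column_is_all_zero, pvG]
  exact pvFoldIfAny _ _ false

lemma pvRange_zero_toNat (b : Int) :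
    PySem.List.pyRange 0 b 1 = PySem.List.pyRange 0 (b.toNat : Int) 1 := by
  have h : (b - 0).toNat = (((b.toNat : Int)) - 0).toNat := by omega
  rw [PySem.List.pyRange_one, PySem.List.pyRange_one, h]

lemma pvOneRow (S f : Int → Int) (n : Nat) :
    (PySem.List.enumerate ((PySem.List.pyRange 0 (n : Int) 1).map S)).map
        (fun cs => cs.2 + f cs.1)
      = (PySem.List.pyRange 0 (n : Int) 1).map (fun c => S c + f c) := by
  rw [PySem.List.enumerate_eq_map_pyRange _ (0 : Int)]
  have hlen : PySem.List.len ((PySem.List.pyRange 0 (n : Int) 1).map S) = (n : Int) := by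
    simp [PySem.List.len_eq, PySem.List.length_pyRange_one]
  rw [hlen, List.map_map]
  apply List.map_congr_left
  intro a ha
  have hmem := (PySem.List.mem_pyRange_one).mp ha
  have hk : a = ((a.toNat : Nat) : Int) := by omega
  have hlt : a.toNat < n := by omega
  simp only [Function.comp_apply]
  rw [hk, PySem.List.pyGetD_map_pyRange S n a.toNat 0 hlt]

lemma pvOuter (m : List (List Int)) (L : List Int) (n : Nat) (S : Int → Int) :
    L.foldl (fun sums row => (PySem.List.enumerate sums).map
        (fun cs => cs.2 + PySem.List.pyGetD (PySem.List.pyGetD m row []) cs.1 0))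
      ((PySem.List.pyRange 0 (n : Int) 1).map S)
      = (PySem.List.pyRange 0 (n : Int) 1).map
          (fun c => S c + (L.map (fun r => pvG m r c)).sum) := by
  induction L generalizing S with
  | nil => simp
  | cons r L ih =>
    simp only [List.foldl_cons,
      pvOneRow S (fun c => PySem.List.pyGetD (PySem.List.pyGetD m r []) c 0) n, ih]
    apply List.map_congr_left
    intro a _
    simp [pvG, add_assoc]

lemma pvB_char (m : List (List Int)) (rl cl : Int) :
    process_columns_alt m rl cl =
      (PySem.List.pyRange 0 cl 1).any (fun c =>
        ((PySem.List.pyRange 0 rl 1).map (fun r => pvG m r c)).sum == 0) := by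
  unfold process_columns_alt
  by_cases hcl : cl <= 0
  · have h1 : PySem.List.pyRepeat ([0] : List Int) cl = [] := by
      rw [PySem.List.pyRepeat_singleton]
      have : cl.toNat = 0 := by omega
      simp [this]
    have h2 : PySem.List.pyRange 0 cl 1 = [] := PySem.List.pyRange_one_eq_nil hcl
    simp [h1, h2]
  have h0 : PySem.List.pyRepeat ([0] : List Int) cl
      = (PySem.List.pyRange 0 (cl.toNat : Int) 1).map (fun _ => (0 : Int)) := by
    have h : (((cl.toNat : Int)) - 0).toNat = cl.toNat := by omega
    rw [PySem.List.pyRepeat_singleton, List.map_const', PySem.List.length_pyRange_one, h]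
  have hne : (PySem.List.pyRange 0 (cl.toNat : Int) 1).map (fun _ => (0 : Int)) ≠ [] := by
    intro hemp
    have := congrArg List.length hemp
    simp [PySem.List.length_pyRange_one] at this
    omega
  simp only [h0]
  rw [if_neg hne]
  simp only [pvOuter m (PySem.List.pyRange 0 rl 1) cl.toNat (fun _ => 0)]
  rw [List.any_map, pvRange_zero_toNat cl]
  refine List.any_congr rfl (fun a => ?_)
  simp [pvG]

-- ===== VERDICT (by name: the statement is the Claim_ definition above) =====
theorem process_columns_spec : Claim_equal_process_columns := by
  intro matrix row_length column_length _ _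
  unfold Spec_process_columns
  rw [pvA_char, pvB_char]
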